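-- pv_equiv track=rewrite | github.com/anhtu95/mmpose | drawing_projection.py | get_points_of_foot
-- ===== SOURCE A (Python) =====
-- def get_points_of_foot(list_points):
--     max_y = [-1, -1]
--     foot_point_x = [-1, -1]
--     foot_point_y = [-1, -1]
--     for p in list_points:
--         if p[1] > max_y[0]:
--             max_y[1] = max_y[0]
--             max_y[0] = p[1]
--             foot_point_x[1] = foot_point_x[0]
--             foot_point_x[0] = p[0]
--             foot_point_y[1] = foot_point_y[0]
--             foot_point_y[0] = p[1]
--         elif p[1] > max_y[1]:
--             max_y[1] = p[1]
--             foot_point_x[1] = p[0]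
--             foot_point_y[1] = p[1]
--     return (foot_point_x[0], foot_point_y[0]), (foot_point_x[1], foot_point_y[1])
-- ===== SOURCE B (Python) =====
-- def get_points_of_foot(list_points):
--     candidates = [(p[0], p[1]) for p in list_points if p[1] > -1]
--     ranked = sorted(candidates, key=lambda q: q[1], reverse=True)
--     first = ranked[0] if ranked else (-1, -1)
--     second = ranked[1] if len(ranked) > 1 else (-1, -1)
--     return first, second
-- ===== Notes on version B (the rewrite author's own statement) =====
-- stated objective: alternative
-- what changed: Replaces the live top-2 tracking scan (three mutated 2-slot lists) with filter-candidates, stable descending sort by y, then take the first two (padded with (-1,-1)).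
import Mathlib
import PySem

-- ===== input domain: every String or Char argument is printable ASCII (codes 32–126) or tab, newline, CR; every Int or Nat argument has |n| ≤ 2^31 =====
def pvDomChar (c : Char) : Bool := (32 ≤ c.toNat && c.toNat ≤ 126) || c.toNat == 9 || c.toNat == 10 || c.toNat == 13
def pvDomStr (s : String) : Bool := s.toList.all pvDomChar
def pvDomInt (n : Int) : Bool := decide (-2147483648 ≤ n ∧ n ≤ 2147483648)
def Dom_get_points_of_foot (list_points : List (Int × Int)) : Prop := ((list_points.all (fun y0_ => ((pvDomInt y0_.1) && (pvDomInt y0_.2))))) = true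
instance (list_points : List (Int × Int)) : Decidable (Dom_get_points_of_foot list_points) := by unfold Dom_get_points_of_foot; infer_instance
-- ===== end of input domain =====

-- B is an alternative decomposition (filter + stable reverse sort + take first two), not faster than A's single scan.

-- ===== PORT A =====
-- A's loop body: state = (max_y, foot_point_x, foot_point_y), each a 2-slot pair
def pvStepA (st : (Int × Int) × (Int × Int) × (Int × Int)) (p : Int × Int) :
    (Int × Int) × (Int × Int) × (Int × Int) :=
  if p.2 > st.1.1 then ((p.2, st.1.1), (p.1, st.2.1.1), (p.2, st.2.2.1))
  else if p.2 > st.1.2 then ((st.1.1, p.2), (st.2.1.1, p.1), (st.2.2.1, p.2))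
  else st

def get_points_of_foot (list_points : List (Int × Int)) : (Int × Int) × (Int × Int) :=
  let st := list_points.foldl pvStepA ((-1, -1), (-1, -1), (-1, -1))
  ((st.2.1.1, st.2.2.1), (st.2.1.2, st.2.2.2))

-- ===== PORT B =====
def get_points_of_foot_alt (list_points : List (Int × Int)) : (Int × Int) × (Int × Int) :=
  let candidates := list_points.filter (fun p => decide (p.2 > -1))
  let ranked := PySem.List.sorted candidates (fun q => q.2) true
  let first := match ranked with | a :: _ => a | [] => ((-1 : Int), (-1 : Int))
  let second := match ranked with | _ :: b :: _ => b | _ => ((-1 : Int), (-1 : Int))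
  (first, second)

-- ===== PRECONDITION & SPEC =====
def Spec_get_points_of_foot (list_points : List (Int × Int)) (out : (Int × Int) × (Int × Int)) : Prop := out = get_points_of_foot_alt list_points
instance (list_points : List (Int × Int)) (out : (Int × Int) × (Int × Int)) : Decidable (Spec_get_points_of_foot list_points out) := by unfold Spec_get_points_of_foot; infer_instance

-- ===== CLAIM (what is proved, stated in full; the proofs are below) =====
def Claim_equal_get_points_of_foot : Prop := ∀ (list_points : List (Int × Int)), Dom_get_points_of_foot list_points → Spec_get_points_of_foot list_points (get_points_of_foot list_points)

-- ===== LEMMAS AND PROOFS =====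

-- the sorted candidate list, written as the foldl of insertBy (sorted_rev_eq_foldl_insertBy)
def pvS (l : List (Int × Int)) : List (Int × Int) :=
  (l.filter (fun p => decide (p.2 > -1))).foldl
    (fun acc x => PySem.List.insertBy (fun a b => decide (b.2 < a.2)) x acc) []

-- A's state read off the sorted candidate list (only the first two entries matter)
def pvStateOf (s : List (Int × Int)) : (Int × Int) × (Int × Int) × (Int × Int) :=
  match s with
  | [] => ((-1, -1), (-1, -1), (-1, -1))
  | [a] => ((a.2, -1), (a.1, -1), (a.2, -1))
  | a :: b :: _ => ((a.2, b.2), (a.1, b.1), (a.2, b.2))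

lemma pvS_eq_sorted (l : List (Int × Int)) :
    PySem.List.sorted (l.filter (fun p => decide (p.2 > -1))) (fun q => q.2) true = pvS l := by
  rw [PySem.List.sorted_rev_eq_foldl_insertBy]; rfl

lemma pvS_append (l : List (Int × Int)) (p : Int × Int) :
    pvS (l ++ [p]) = if p.2 > -1 then
      PySem.List.insertBy (fun a b => decide (b.2 < a.2)) p (pvS l) else pvS l := by
  unfold pvS
  rw [List.filter_append]
  by_cases h : p.2 > -1 <;> simp [h, List.foldl_append]

lemma pvMem_pvS (l : List (Int × Int)) (q : Int × Int) (h : q ∈ pvS l) : q.2 > -1 := by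
  rw [← pvS_eq_sorted] at h
  rw [PySem.List.mem_sorted] at h
  have := List.of_mem_filter h
  simpa using this

lemma pvInvariant (l : List (Int × Int)) :
    l.foldl pvStepA ((-1, -1), (-1, -1), (-1, -1)) = pvStateOf (pvS l) := by
  induction l using List.reverseRecOn with
  | nil => rfl
  | append_singleton l p ih =>
    rw [List.foldl_append, ih, pvS_append]
    simp only [List.foldl_cons, List.foldl_nil]
    by_cases hc : p.2 > -1
    · simp only [hc, if_true]
      rcases hs : pvS l with _ | ⟨a, _ | ⟨b, t⟩⟩
      · simp only [PySem.List.insertBy, pvStateOf]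
        unfold pvStepA
        split_ifs <;> simp only [] at *
      · have ha : a.2 > -1 := pvMem_pvS l a (by rw [hs]; simp)
        by_cases h1 : a.2 < p.2 <;>
          simp only [PySem.List.insertBy, h1, if_true,
            decide_true, decide_false, pvStateOf] <;>
          (unfold pvStepA; split_ifs <;> simp only [] at * <;> first | rfl | (exfalso; omega))
      · have ha : a.2 > -1 := pvMem_pvS l a (by rw [hs]; simp)
        have hb : b.2 > -1 := pvMem_pvS l b (by rw [hs]; simp)
        by_cases h1 : a.2 < p.2 <;> by_cases h2 : b.2 < p.2 <;>
          simp only [PySem.List.insertBy, h1, h2, if_true,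
            decide_true, decide_false, pvStateOf] <;>
          (unfold pvStepA; split_ifs <;> simp only [] at * <;> first | rfl | (exfalso; omega))
    · simp only [hc, if_false]
      rcases hs : pvS l with _ | ⟨a, _ | ⟨b, t⟩⟩
      · simp only [pvStateOf]
        unfold pvStepA
        split_ifs <;> simp only [] at *
        all_goals exfalso; omega
      · have ha : a.2 > -1 := pvMem_pvS l a (by rw [hs]; simp)
        simp only [pvStateOf]
        unfold pvStepA
        split_ifs <;> simp only [] at *
        all_goals exfalso; omega
      · have ha : a.2 > -1 := pvMem_pvS l a (by rw [hs]; simp)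
        have hb : b.2 > -1 := pvMem_pvS l b (by rw [hs]; simp)
        simp only [pvStateOf]
        unfold pvStepA
        split_ifs <;> simp only [] at * <;> first | rfl | (exfalso; omega)

-- ===== VERDICT (by name: the statement is the Claim_ definition above) =====
theorem get_points_of_foot_spec : Claim_equal_get_points_of_foot := by
  intro l _
  show get_points_of_foot l = get_points_of_foot_alt l
  simp only [get_points_of_foot, get_points_of_foot_alt]
  rw [pvInvariant, pvS_eq_sorted]
  rcases hs : pvS l with _ | ⟨a, _ | ⟨b, t⟩⟩ <;> simp only [pvStateOf]
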